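-- pv_equiv track=rewrite | github.com/ygidtu/trackplot | sashimi/file/File.py | __set_barcodes__
-- ===== SOURCE A (Python) =====
-- from typing import Optional, Set, List, Dict
--
-- def __set_barcodes__(barcodes: Optional[List[str]]) -> Dict:
--     u"""
--     separate barcodes by its first character to reduce set size
--     :params barcodes: list or set of barcodes
--     """
--     res = {}
--
--     if barcodes is not None:
--         for b in barcodes:
--             if b:
--                 f = b[:min(3, len(b))]
--
--                 if f not in res.keys():
--                     res[f] = set()
--
--                 res[f].add(b)
--
--     return res
-- ===== SOURCE B (Python) =====
-- def __set_barcodes__(barcodes):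
--     """Key-driven regrouping: collect the truthy barcodes once, list the distinct
--     3-char prefixes in first-occurrence order, then gather each key's group in a
--     single comprehension per key (no dict-of-sets mutation)."""
--     if barcodes is None:
--         return {}
--     valid = [b for b in barcodes if b]
--     keys = dict.fromkeys(b[:3] for b in valid)
--     return {k: {b for b in valid if b[:3] == k} for k in keys}
-- ===== Notes on version B (the rewrite author's own statement) =====
-- stated objective: alternative
-- what changed: Replaces A's per-element bucketing into a mutated dict of sets with a key-driven regrouping: filter the truthy barcodes once, list the distinct 3-char prefixes in first-occurrence order (dict.fromkeys), then build each key's group with one comprehension per key.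
import Mathlib
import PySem

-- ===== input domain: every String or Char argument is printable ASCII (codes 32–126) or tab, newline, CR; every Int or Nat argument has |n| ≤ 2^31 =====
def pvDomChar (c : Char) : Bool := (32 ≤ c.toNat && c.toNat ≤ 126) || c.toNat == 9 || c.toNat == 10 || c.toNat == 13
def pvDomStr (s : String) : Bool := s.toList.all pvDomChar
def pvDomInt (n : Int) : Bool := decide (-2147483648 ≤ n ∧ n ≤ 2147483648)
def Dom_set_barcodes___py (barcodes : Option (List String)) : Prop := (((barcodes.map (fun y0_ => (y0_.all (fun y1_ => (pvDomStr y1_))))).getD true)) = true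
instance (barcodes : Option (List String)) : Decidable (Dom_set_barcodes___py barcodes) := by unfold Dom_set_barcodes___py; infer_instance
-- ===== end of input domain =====

-- B changes the decomposition (key-driven regrouping instead of per-element dict-of-sets bucketing); same results, objective: alternative.

-- ===== PORT A =====
-- b[:min(3, len(b))]
def aKey (b : String) : String := PySem.Str.slice b none (some (min 3 (PySem.Str.len b)))

-- literal port of A: fold over the barcodes, skip falsy ones, bucket b under its
-- prefix into a dict of sets (create the empty set when the key is new), return the dict.
def set_barcodes___py (barcodes : Option (List String)) : List (String × List String) :=
  let res : PySem.Dict String (PySem.Set String) := PySem.Dict.empty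
  let res :=
    match barcodes with
    | none => res
    | some bs =>
        bs.foldl (fun d b =>
          if (b : String).toList.isEmpty then d
          else
            let f := aKey b
            let d := if d.contains f then d else d.insert f PySem.Set.empty
            d.modify f PySem.Set.empty (fun s => PySem.Set.add s b)) res
  res.items

-- ===== PORT B =====
-- b[:3]
def bKey (b : String) : String := PySem.Str.slice b none (some 3)

-- literal port of B: filter the truthy barcodes, dedup their keys
-- (dict.fromkeys), then the dict comprehension = a fold inserting each key's group.
def set_barcodes___py_alt (barcodes : Option (List String)) : List (String × List String) :=
  match barcodes with
  | none => []
  | some bs =>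
      let valid := bs.filter (fun b => !b.toList.isEmpty)
      let keys := PySem.List.dedup (valid.map bKey)
      (keys.foldl (fun d k =>
          d.insert k (PySem.Set.ofList (valid.filter (fun b => bKey b == k))))
        (PySem.Dict.empty : PySem.Dict String (PySem.Set String))).items

-- ===== PRECONDITION & SPEC =====
def Spec_set_barcodes___py (barcodes : Option (List String)) (out : List (String × List String)) : Prop := out = set_barcodes___py_alt barcodes
instance (barcodes : Option (List String)) (out : List (String × List String)) : Decidable (Spec_set_barcodes___py barcodes out) := by unfold Spec_set_barcodes___py; infer_instance

-- ===== CLAIM (what is proved, stated in full; the proofs are below) =====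
def Claim_equal_set_barcodes___py : Prop := ∀ (barcodes : Option (List String)), Dom_set_barcodes___py barcodes → Spec_set_barcodes___py barcodes (set_barcodes___py barcodes)

-- ===== LEMMAS AND PROOFS =====

-- the two prefix keys agree: take (min 3 len) = take 3
theorem key_eq (b : String) : aKey b = bKey b := by
  unfold aKey bKey
  simp [PySem.Str.slice]
  rw [PySem.List.slice_to b.toList (b := min 3 (b.length : Int)) (by simp),
    PySem.List.slice_to b.toList (by norm_num)]
  congr 1
  have h : (min (3 : Int) (b.length : Int)).toNat = min 3 b.toList.length := by simp; omega
  have h3 : (Int.toNat 3) = 3 := rfl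
  rw [h, h3]
  rcases Nat.le_total 3 b.toList.length with hl | hl
  · rw [min_eq_left hl]
  · rw [min_eq_right hl, List.take_of_length_le hl, List.take_of_length_le (by omega)]

-- A's body for a truthy barcode is a plain modify
theorem step_eq_modify (d : PySem.Dict String (PySem.Set String)) (f : String)
    (g : PySem.Set String → PySem.Set String) :
    (if d.contains f then d else d.insert f PySem.Set.empty).modify f PySem.Set.empty g
      = d.modify f PySem.Set.empty g := by
  by_cases h : d.contains f
  · simp [h]
  · rw [if_neg (by simp [h])]
    simp only [PySem.Dict.modify, PySem.Dict.insert_insert_self, PySem.Dict.getD_insert_self]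
    rw [PySem.Dict.getD_of_not_contains d PySem.Set.empty (by simpa using h)]

-- value invariant of the modify loop
theorem getD_loop (l : List String) (k : String) (d : PySem.Dict String (PySem.Set String)) :
    (l.foldl (fun d b => d.modify (bKey b) PySem.Set.empty (fun s => PySem.Set.add s b)) d).getD
        k PySem.Set.empty
      = (l.filter (fun b => bKey b == k)).foldl PySem.Set.add (d.getD k PySem.Set.empty) := by
  induction l generalizing d with
  | nil => rfl
  | cons b l ih =>
      simp only [List.foldl_cons, List.filter_cons, ih, PySem.Dict.getD_modify]
      by_cases h : bKey b = k
      · simp [h]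
      · simp [h, Ne.symm h]

-- A's fold skipping falsy barcodes = the modify-only fold over the filtered list
theorem foldl_skip (bs : List String) (d : PySem.Dict String (PySem.Set String)) :
    bs.foldl (fun d b =>
        if b.toList.isEmpty then d
        else (if d.contains (aKey b) then d else d.insert (aKey b) PySem.Set.empty).modify
          (aKey b) PySem.Set.empty (fun s => PySem.Set.add s b)) d
      = (bs.filter (fun b => !b.toList.isEmpty)).foldl
          (fun d b => d.modify (bKey b) PySem.Set.empty (fun s => PySem.Set.add s b)) d := by
  induction bs generalizing d with
  | nil => rfl
  | cons b bs ih =>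
      cases h : b.toList.isEmpty with
      | true =>
          simp only [List.foldl_cons, List.filter_cons, h, reduceIte]
          exact ih d
      | false =>
          simp only [List.foldl_cons, List.filter_cons, h, Bool.false_eq_true, Bool.not_false, reduceIte]
          rw [step_eq_modify, key_eq, ih]

theorem set_barcodes___py_spec : Claim_equal_set_barcodes___py := by
  intro barcodes _
  unfold Spec_set_barcodes___py set_barcodes___py set_barcodes___py_alt
  cases barcodes with
  | none => rfl
  | some bs =>
      simp only []
      rw [show (fun (d : PySem.Dict String (PySem.Set String)) (b : String) =>
          if b.toList.isEmpty then d
          else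
            let f := aKey b
            let d := if d.contains f then d else d.insert f PySem.Set.empty
            d.modify f PySem.Set.empty (fun s => PySem.Set.add s b))
        = (fun (d : PySem.Dict String (PySem.Set String)) (b : String) =>
          if b.toList.isEmpty then d
          else (if d.contains (aKey b) then d else d.insert (aKey b) PySem.Set.empty).modify
            (aKey b) PySem.Set.empty (fun s => PySem.Set.add s b)) from rfl]
      rw [foldl_skip]
      set v := bs.filter (fun b => !b.toList.isEmpty) with hv
      set D := v.foldl (fun d b => d.modify (bKey b) PySem.Set.empty (fun s => PySem.Set.add s b))
        (PySem.Dict.empty : PySem.Dict String (PySem.Set String)) with hD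
      have hnd : D.keys.Nodup := by
        rw [hD]
        exact PySem.Dict.nodup_keys_foldl_modify_key v bKey PySem.Set.empty
          (fun _ b => fun s => PySem.Set.add s b) PySem.Dict.empty (by simp)
      have hkeys : D.keys = PySem.List.dedup (v.map bKey) := by
        rw [hD, PySem.Dict.keys_foldl_modify_key v bKey PySem.Set.empty
          (fun _ b => fun s => PySem.Set.add s b) PySem.Dict.empty]
        simp [PySem.Dict.keys_empty, PySem.Set.update, PySem.Set.ofList_eq_foldl]
      rw [PySem.Dict.items_eq_map_keys D hnd PySem.Set.empty, hkeys]
      rw [PySem.Dict.items_foldl_insert_fresh (PySem.List.dedup (v.map bKey)) (fun k => k)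
        (fun k => PySem.Set.ofList (v.filter (fun b => bKey b == k))) PySem.Dict.empty
        (fun a _ => by simp) (by simp)]
      simp only [show (PySem.Dict.empty : PySem.Dict String (PySem.Set String)).items = [] from rfl, List.nil_append]
      refine List.map_congr_left (fun k _ => ?_)
      rw [hD, getD_loop]
      simp [PySem.Set.ofList_eq_foldl, PySem.Dict.getD_empty]
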